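-- pv_equiv track=rewrite | github.com/muddykat-tech/Silmat-Auki-Online | modules/basic_message_analysis.py | analyze_message_content
-- ===== SOURCE A (Python) =====
-- def analyze_message_content(message_content):
--     analyzed_content = []
--     lines = message_content.split('5')
--     for line in lines:
--         if line:
--             image_paths = [f"static/resources/images/eyes/eye_{char}.png alt='{char}'" for char in line if
--                            char.isdigit() and char != '5']
--             analyzed_content.append(image_paths)
--     return analyzed_content
-- ===== SOURCE B (Python) =====
-- def analyze_message_content(message_content):
--     analyzed_content = []
--     image_paths = []
--     segment_nonempty = False
--     for char in message_content:
--         if char == '5':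
--             if segment_nonempty:
--                 analyzed_content.append(image_paths)
--             image_paths = []
--             segment_nonempty = False
--         else:
--             segment_nonempty = True
--             if char.isdigit():
--                 image_paths.append(f"static/resources/images/eyes/eye_{char}.png alt='{char}'")
--     if segment_nonempty:
--         analyzed_content.append(image_paths)
--     return analyzed_content
-- ===== Notes on version B (the rewrite author's own statement) =====
-- stated objective: alternative
-- what changed: Replaces split('5') plus a per-segment list comprehension with a single character-by-character pass that maintains the current path list and a segment-nonempty flag, flushing on each '5' and at the end.
import Mathlib
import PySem

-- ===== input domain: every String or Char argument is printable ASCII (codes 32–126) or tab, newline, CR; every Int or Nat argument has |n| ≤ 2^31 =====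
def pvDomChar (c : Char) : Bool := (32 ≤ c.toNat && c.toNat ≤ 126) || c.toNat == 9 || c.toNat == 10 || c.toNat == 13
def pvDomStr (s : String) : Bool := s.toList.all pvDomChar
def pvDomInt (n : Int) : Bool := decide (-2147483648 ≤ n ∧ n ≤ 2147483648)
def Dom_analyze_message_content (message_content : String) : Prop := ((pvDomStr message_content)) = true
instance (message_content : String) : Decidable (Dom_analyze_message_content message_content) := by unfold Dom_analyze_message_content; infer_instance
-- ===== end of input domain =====

-- B replaces split('5') + a per-segment comprehension by one character pass with a flag; same cost, different decomposition.

-- shared format helper: f"static/resources/images/eyes/eye_{char}.png alt='{char}'"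
def pvFmt (c : Char) : String :=
  "static/resources/images/eyes/eye_" ++ String.ofList [c] ++ ".png alt='" ++ String.ofList [c] ++ "'"

-- ===== PORT A =====
def analyze_message_content (message_content : String) : List (List String) :=
  let lines := PySem.Chars.splitOn message_content.toList "5".toList
  lines.foldl
    (fun acc line =>
      if line ≠ [] then
        acc ++ [(line.filter (fun c => PySem.Chars.isdigit c && !(c == '5'))).map pvFmt]
      else acc) []

-- ===== PORT B =====
def analyze_message_content_alt (message_content : String) : List (List String) :=
  let st := message_content.toList.foldl
    (fun (st : List (List String) × List String × Bool) c =>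
      if c == '5' then
        ((if st.2.2 then st.1 ++ [st.2.1] else st.1), [], false)
      else
        (st.1, (if PySem.Chars.isdigit c then st.2.1 ++ [pvFmt c] else st.2.1), true))
    ([], [], false)
  if st.2.2 then st.1 ++ [st.2.1] else st.1

-- ===== PRECONDITION & SPEC =====
def Spec_analyze_message_content (message_content : String) (out : List (List String)) : Prop := out = analyze_message_content_alt message_content
instance (message_content : String) (out : List (List String)) : Decidable (Spec_analyze_message_content message_content out) := by unfold Spec_analyze_message_content; infer_instance

-- ===== CLAIM (what is proved, stated in full; the proofs are below) =====
def Claim_equal_analyze_message_content : Prop := ∀ (message_content : String), Dom_analyze_message_content message_content → Spec_analyze_message_content message_content (analyze_message_content message_content)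

-- ===== LEMMAS AND PROOFS =====

-- Structural characterization of splitting on '5', with the current (reversed-free) prefix carried along.
def pvSplitAux (pre : List Char) : List Char → List (List Char)
  | [] => [pre]
  | c :: r => if c = '5' then pre :: pvSplitAux [] r else pvSplitAux (pre ++ [c]) r

lemma pvGo_spec : ∀ (l : List Char) (fuel : Nat) (cur : List Char) (acc : List (List Char)),
    l.length ≤ fuel →
    PySem.Chars.splitOn.go ['5'] fuel l cur acc = acc.reverse ++ pvSplitAux cur.reverse l := by
  intro l
  induction l with
  | nil =>
    intro fuel cur acc _
    cases fuel <;> simp [PySem.Chars.splitOn.go, pvSplitAux]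
  | cons c rest ih =>
    intro fuel cur acc h
    cases fuel with
    | zero => simp at h
    | succ fuel =>
      by_cases hc : c = '5'
      · subst hc
        rw [show PySem.Chars.splitOn.go ['5'] (fuel+1) ('5' :: rest) cur acc
              = PySem.Chars.splitOn.go ['5'] fuel rest [] (cur.reverse :: acc) by
            simp [PySem.Chars.splitOn.go, List.isPrefixOf]]
        rw [ih fuel [] (cur.reverse :: acc) (by simpa using Nat.le_of_succ_le_succ h)]
        simp [pvSplitAux]
      · rw [show PySem.Chars.splitOn.go ['5'] (fuel+1) (c :: rest) cur acc
              = PySem.Chars.splitOn.go ['5'] fuel rest (c :: cur) acc by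
            simp [PySem.Chars.splitOn.go, List.isPrefixOf]
            exact fun h => absurd h.symm hc]
        rw [ih fuel (c :: cur) acc (by simpa using Nat.le_of_succ_le_succ h)]
        simp [pvSplitAux, hc]

lemma pvSplitOn_eq (l : List Char) :
    PySem.Chars.splitOn l ['5'] = pvSplitAux [] l := by
  have := pvGo_spec l (l.length + 1) [] [] (by omega)
  simpa [PySem.Chars.splitOn] using this

-- what B's current path list is as a function of the pending segment
def pvPaths (pre : List Char) : List String :=
  (pre.filter PySem.Chars.isdigit).map pvFmt

lemma pvPaths_eq_A (pre : List Char) (h5 : '5' ∉ pre) :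
    (pre.filter (fun c => PySem.Chars.isdigit c && !(c == '5'))).map pvFmt = pvPaths pre := by
  unfold pvPaths
  congr 1
  apply List.filter_congr
  intro c hc
  have : ¬ c = '5' := fun h => h5 (h ▸ hc)
  simp [this]

lemma pvLoop_eq : ∀ (l pre : List Char) (res : List (List String)), '5' ∉ pre →
    (let st := l.foldl
        (fun (st : List (List String) × List String × Bool) c =>
          if c == '5' then
            ((if st.2.2 then st.1 ++ [st.2.1] else st.1), [], false)
          else
            (st.1, (if PySem.Chars.isdigit c then st.2.1 ++ [pvFmt c] else st.2.1), true))
        (res, pvPaths pre, !pre.isEmpty)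
      if st.2.2 then st.1 ++ [st.2.1] else st.1)
    = (pvSplitAux pre l).foldl
        (fun acc line =>
          if line ≠ [] then
            acc ++ [(line.filter (fun c => PySem.Chars.isdigit c && !(c == '5'))).map pvFmt]
          else acc) res := by
  intro l
  induction l with
  | nil =>
    intro pre res h5
    cases pre with
    | nil => simp [pvSplitAux]
    | cons a as => simp [pvSplitAux, pvPaths_eq_A _ h5]
  | cons c rest ih =>
    intro pre res h5
    by_cases hc : c = '5'
    · subst hc
      simp only [pvSplitAux, List.foldl_cons, beq_self_eq_true, if_true]
      rw [show (if (!pre.isEmpty) = true then res ++ [pvPaths pre] else res)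
            = (if pre ≠ [] then
                res ++ [(pre.filter (fun c => PySem.Chars.isdigit c && !(c == '5'))).map pvFmt]
              else res) by
          cases pre with
          | nil => simp
          | cons a as => simp [pvPaths_eq_A _ h5]]
      exact ih [] _ (by simp)
    · have hcc : (c == '5') = false := by simp [hc]
      simp only [pvSplitAux, List.foldl_cons, hcc]
      rw [if_neg (by simp : ¬ false = true), if_neg hc]
      have h5' : '5' ∉ pre ++ [c] := by
        intro h
        rcases List.mem_append.mp h with h | h
        · exact h5 h
        · simp at h; exact hc h.symm
      have hp : (if PySem.Chars.isdigit c then pvPaths pre ++ [pvFmt c] else pvPaths pre)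
          = pvPaths (pre ++ [c]) := by
        unfold pvPaths
        by_cases hd : PySem.Chars.isdigit c <;> simp [hd, List.filter_append]
      have hb : (!(pre ++ [c]).isEmpty) = true := by simp
      have := ih (pre ++ [c]) res h5'
      rw [← hp, hb] at this
      exact this

-- ===== VERDICT (by name: the statement is the Claim_ definition above) =====
theorem analyze_message_content_spec : Claim_equal_analyze_message_content := by
  intro s _
  unfold Spec_analyze_message_content analyze_message_content analyze_message_content_alt
  rw [show ("5".toList) = ['5'] from rfl, pvSplitOn_eq]
  have := pvLoop_eq s.toList [] []
  simpa [pvPaths] using (this (by simp)).symm
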